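-- pv_equiv track=rewrite | github.com/NEUAnalyses/HHWWgg_Tools | HIG-21-014/Post-PreAppTalk-Checks/SystematicTreeNames.py | GetSystLabels
-- ===== SOURCE A (Python) =====
-- def GetSystLabels(year):
--
--     systLabels = []
--
--     # Different names per year
--     listOfSources_2016 = [
--                             "Absolute",
--                             "Absolute2016",
--                             "BBEC1",
--                             "BBEC12016",
--                             "EC2",
--                             "EC22016",
--                             "FlavorQCD",
--                             "HF",
--                             "HF2016",
--                             "RelativeBal",
--                             "RelativeSample2016"
--                             ]
--
--     listOfSources_2017 = [
--                     "Absolute",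
--                     "Absolute2017",
--                     "BBEC1",
--                     "BBEC12017",
--                     "EC2",
--                     "EC22017",
--                     "FlavorQCD",
--                     "HF",
--                     "HF2017",
--                     "RelativeBal",
--                     "RelativeSample2017"
--                     ]
--
--     listOfSources_2018 = [
--                     "Absolute",
--                     "Absolute2018",
--                     "BBEC1",
--                     "BBEC12018",
--                     "EC2",
--                     "EC22018",
--                     "FlavorQCD",
--                     "HF",
--                     "HF2018",
--                     "RelativeBal",
--                     "RelativeSample2018"
--                     ]
--
--
--     for direction in ["Up","Down"]:
--
--         ##-- Photons
--         systLabels.append("MvaShift%s01sigma"%direction)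
--         systLabels.append("SigmaEOverEShift%s01sigma"%direction)
--         systLabels.append("MaterialCentralBarrel%s01sigma"%direction)
--         systLabels.append("MaterialOuterBarrel%s01sigma"%direction)
--         systLabels.append("MaterialForward%s01sigma"%direction)
--         systLabels.append("FNUFEB%s01sigma"%direction)
--         systLabels.append("FNUFEE%s01sigma"%direction)
--         systLabels.append("MCScaleGain6EB%s01sigma"%direction)
--         systLabels.append("MCScaleGain1EB%s01sigma"%direction)
--
--         ##-- Jets
--         systLabels.append("JEC%s01sigma" % direction)
--         systLabels.append("JER%s01sigma" % direction)
--         systLabels.append("PUJIDShift%s01sigma" % direction)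
--
--         ##-- Different reduced JEC names for different years
--         if(year == '2016'):
--             for sourceName in listOfSources_2016:
--                 systLabels.append("JEC%s%s01sigma" % (str(sourceName),direction))
--         elif(year == '2017'):
--             for sourceName in listOfSources_2017:
--                 systLabels.append("JEC%s%s01sigma" % (str(sourceName),direction))
--         elif(year == '2018'):
--             for sourceName in listOfSources_2018:
--                 systLabels.append("JEC%s%s01sigma" % (str(sourceName),direction))
--
--         ##-- HEM Systematic only in 2018
--         if(year == '2018'):
--             systLabels.append("JetHEM%s01sigma" % (direction))
--
--         ##-- MET
--         systLabels.append("metJecUncertainty%s01sigma" % direction)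
--         systLabels.append("metJerUncertainty%s01sigma" % direction)
--         systLabels.append("metPhoUncertainty%s01sigma" % direction)
--         systLabels.append("metUncUncertainty%s01sigma" % direction)
--
--         for r9 in ["HighR9","LowR9"]:
--             for region in ["EB","EE"]:
--                 systLabels.append("ShowerShape%s%s%s01sigma"%(r9,region,direction))
--                 systLabels.append("MCScale%s%s%s01sigma" % (r9,region,direction))
--                 for var in ["Rho","Phi"]:
--                     systLabels.append("MCSmear%s%s%s%s01sigma" % (r9,region,var,direction))
--
--     return systLabels
-- ===== SOURCE B (Python) =====
-- def GetSystLabels(year):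
--     # Generate label stems by cartesian-product expansion of small part tables,
--     # build the "Up" half, and derive the "Down" half from it by suffix surgery.
--     def product(*alts):
--         out = [""]
--         for alt in alts:
--             out = [p + a for p in out for a in alt]
--         return out
--
--     stems = ["MvaShift", "SigmaEOverEShift", "MaterialCentralBarrel",
--              "MaterialOuterBarrel", "MaterialForward", "FNUFEB", "FNUFEE",
--              "MCScaleGain6EB", "MCScaleGain1EB",
--              "JEC", "JER", "PUJIDShift"]
--     if year in ("2016", "2017", "2018"):
--         sources = (product(["Absolute", "BBEC1", "EC2"], ["", year])
--                    + ["FlavorQCD"]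
--                    + product(["HF"], ["", year])
--                    + ["RelativeBal", "RelativeSample" + year])
--         stems += product(["JEC"], sources)
--     if year == "2018":
--         stems.append("JetHEM")
--     stems += product(["met"], ["Jec", "Jer", "Pho", "Unc"], ["Uncertainty"])
--     for rr in product(["HighR9", "LowR9"], ["EB", "EE"]):
--         stems += ["ShowerShape" + rr, "MCScale" + rr]
--         stems += product(["MCSmear" + rr], ["Rho", "Phi"])
--
--     ups = [s + "Up01sigma" for s in stems]
--     return ups + [u[:-len("Up01sigma")] + "Down01sigma" for u in ups]
-- ===== Notes on version B (the rewrite author's own statement) =====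
-- stated objective: simpler
-- what changed: Instead of A's direction-outer append loop over hard-coded per-year source lists and nested r9/region/var loops, B generates label stems by a generic cartesian-product expansion helper over small part tables (the year-specific JEC sources produced from base-name x {'', year} products), builds only the Up half, and derives the Down half from it by suffix replacement.
import Mathlib
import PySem

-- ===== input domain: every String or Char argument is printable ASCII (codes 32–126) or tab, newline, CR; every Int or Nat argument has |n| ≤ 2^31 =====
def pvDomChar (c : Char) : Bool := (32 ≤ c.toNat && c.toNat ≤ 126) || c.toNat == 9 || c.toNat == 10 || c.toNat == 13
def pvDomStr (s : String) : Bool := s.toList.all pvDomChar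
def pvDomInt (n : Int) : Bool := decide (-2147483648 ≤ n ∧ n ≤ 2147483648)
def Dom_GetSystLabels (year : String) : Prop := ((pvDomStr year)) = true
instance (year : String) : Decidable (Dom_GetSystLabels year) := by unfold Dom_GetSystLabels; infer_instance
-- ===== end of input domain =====

-- B generates the label stems by cartesian-product expansion of small part tables,
-- builds the Up half, and derives the Down half by suffix surgery (objective: simpler).

-- ===== PORT A =====
def GetSystLabels (year : String) : List String :=
  let listOfSources_2016 : List String :=
    ["Absolute", "Absolute2016", "BBEC1", "BBEC12016", "EC2", "EC22016",
     "FlavorQCD", "HF", "HF2016", "RelativeBal", "RelativeSample2016"]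
  let listOfSources_2017 : List String :=
    ["Absolute", "Absolute2017", "BBEC1", "BBEC12017", "EC2", "EC22017",
     "FlavorQCD", "HF", "HF2017", "RelativeBal", "RelativeSample2017"]
  let listOfSources_2018 : List String :=
    ["Absolute", "Absolute2018", "BBEC1", "BBEC12018", "EC2", "EC22018",
     "FlavorQCD", "HF", "HF2018", "RelativeBal", "RelativeSample2018"]
  (["Up", "Down"]).foldl (fun systLabels direction =>
    -- Photons
    let systLabels := systLabels ++ ["MvaShift" ++ direction ++ "01sigma"]
    let systLabels := systLabels ++ ["SigmaEOverEShift" ++ direction ++ "01sigma"]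
    let systLabels := systLabels ++ ["MaterialCentralBarrel" ++ direction ++ "01sigma"]
    let systLabels := systLabels ++ ["MaterialOuterBarrel" ++ direction ++ "01sigma"]
    let systLabels := systLabels ++ ["MaterialForward" ++ direction ++ "01sigma"]
    let systLabels := systLabels ++ ["FNUFEB" ++ direction ++ "01sigma"]
    let systLabels := systLabels ++ ["FNUFEE" ++ direction ++ "01sigma"]
    let systLabels := systLabels ++ ["MCScaleGain6EB" ++ direction ++ "01sigma"]
    let systLabels := systLabels ++ ["MCScaleGain1EB" ++ direction ++ "01sigma"]
    -- Jets
    let systLabels := systLabels ++ ["JEC" ++ direction ++ "01sigma"]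
    let systLabels := systLabels ++ ["JER" ++ direction ++ "01sigma"]
    let systLabels := systLabels ++ ["PUJIDShift" ++ direction ++ "01sigma"]
    -- Different reduced JEC names for different years
    let systLabels :=
      if year = "2016" then
        listOfSources_2016.foldl (fun acc sourceName =>
          acc ++ ["JEC" ++ sourceName ++ direction ++ "01sigma"]) systLabels
      else if year = "2017" then
        listOfSources_2017.foldl (fun acc sourceName =>
          acc ++ ["JEC" ++ sourceName ++ direction ++ "01sigma"]) systLabels
      else if year = "2018" then
        listOfSources_2018.foldl (fun acc sourceName =>
          acc ++ ["JEC" ++ sourceName ++ direction ++ "01sigma"]) systLabels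
      else systLabels
    -- HEM systematic only in 2018
    let systLabels :=
      if year = "2018" then systLabels ++ ["JetHEM" ++ direction ++ "01sigma"]
      else systLabels
    -- MET
    let systLabels := systLabels ++ ["metJecUncertainty" ++ direction ++ "01sigma"]
    let systLabels := systLabels ++ ["metJerUncertainty" ++ direction ++ "01sigma"]
    let systLabels := systLabels ++ ["metPhoUncertainty" ++ direction ++ "01sigma"]
    let systLabels := systLabels ++ ["metUncUncertainty" ++ direction ++ "01sigma"]
    (["HighR9", "LowR9"]).foldl (fun acc r9 =>
      (["EB", "EE"]).foldl (fun acc region =>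
        let acc := acc ++ ["ShowerShape" ++ r9 ++ region ++ direction ++ "01sigma"]
        let acc := acc ++ ["MCScale" ++ r9 ++ region ++ direction ++ "01sigma"]
        (["Rho", "Phi"]).foldl (fun acc var =>
          acc ++ ["MCSmear" ++ r9 ++ region ++ var ++ direction ++ "01sigma"]) acc) acc)
      systLabels) []

-- ===== PORT B =====
-- Source B's inner helper `product`: cartesian-product expansion by left fold,
-- out = [p + a for p in out for a in alt] for each alternative list in turn.
def pvProduct (alts : List (List String)) : List String :=
  alts.foldl (fun out alt => out.flatMap (fun p => alt.map (fun a => p ++ a))) [""]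

def GetSystLabels_alt (year : String) : List String :=
  let stems : List String :=
    ["MvaShift", "SigmaEOverEShift", "MaterialCentralBarrel",
     "MaterialOuterBarrel", "MaterialForward", "FNUFEB", "FNUFEE",
     "MCScaleGain6EB", "MCScaleGain1EB",
     "JEC", "JER", "PUJIDShift"]
  let stems :=
    if year = "2016" ∨ year = "2017" ∨ year = "2018" then
      let sources :=
        pvProduct [["Absolute", "BBEC1", "EC2"], ["", year]]
          ++ ["FlavorQCD"]
          ++ pvProduct [["HF"], ["", year]]
          ++ ["RelativeBal", "RelativeSample" ++ year]
      stems ++ pvProduct [["JEC"], sources]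
    else stems
  let stems := if year = "2018" then stems ++ ["JetHEM"] else stems
  let stems := stems ++ pvProduct [["met"], ["Jec", "Jer", "Pho", "Unc"], ["Uncertainty"]]
  let stems := stems ++
    (pvProduct [["HighR9", "LowR9"], ["EB", "EE"]]).flatMap (fun rr =>
      ["ShowerShape" ++ rr, "MCScale" ++ rr] ++ pvProduct [["MCSmear" ++ rr], ["Rho", "Phi"]])
  let ups := stems.map (fun s => s ++ "Up01sigma")
  -- u[:-len("Up01sigma")] = u[:-9], ported exactly with PySem.Str.slice
  ups ++ ups.map (fun u => PySem.Str.slice u none (some (-9)) ++ "Down01sigma")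

-- ===== PRECONDITION & SPEC =====
def Spec_GetSystLabels (year : String) (out : List String) : Prop := out = GetSystLabels_alt year
instance (year : String) (out : List String) : Decidable (Spec_GetSystLabels year out) := by unfold Spec_GetSystLabels; infer_instance

-- ===== CLAIM =====
def Claim_equal_GetSystLabels : Prop := ∀ (year : String), Dom_GetSystLabels year → Spec_GetSystLabels year (GetSystLabels year)

-- ===== LEMMAS AND PROOFS =====
theorem GetSystLabels_eq_alt (year : String) :
    GetSystLabels year = GetSystLabels_alt year := by
  by_cases h16 : year = "2016"
  · subst h16; decide
  · by_cases h17 : year = "2017"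
    · subst h17; decide
    · by_cases h18 : year = "2018"
      · subst h18; decide
      · simp [GetSystLabels, GetSystLabels_alt, h16, h17, h18]
        decide

-- ===== VERDICT =====
theorem GetSystLabels_spec : Claim_equal_GetSystLabels := by
  intro year _
  exact GetSystLabels_eq_alt year
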